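-- pv_equiv track=rewrite | github.com/lunivilen/dubna | ml_notebook/existing_algs.py | count_shared
-- ===== SOURCE A (Python) =====
-- def count_shared(tracks):
--     used_hits = set()
--     shared_num = {}
--     for i, track in tracks.items():
--         shared_num[i]=0
--         for hit in track:
--             if str(hit) in used_hits:
--                 shared_num[i]+=1
--             else:
--                 used_hits.add(str(hit))
--     return shared_num
-- ===== SOURCE B (Python) =====
-- def count_shared(tracks):
--     # Pass 1: attribute each distinct hit string to the first track it appears in.
--     first_track = {}
--     for i, track in tracks.items():
--         for hit in track:
--             first_track.setdefault(str(hit), i)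
--     # Pass 2: count how many distinct hit strings were first introduced by each track.
--     fresh = {}
--     for i in first_track.values():
--         fresh[i] = fresh.get(i, 0) + 1
--     # A hit is "shared" unless it is one of the distinct strings this track introduced.
--     return {i: len(track) - fresh.get(i, 0) for i, track in tracks.items()}
-- ===== Notes on version B (the rewrite author's own statement) =====
-- stated objective: alternative
-- what changed: B replaces A's single pass with a running seen-set and per-hit increments by a staged pipeline: one pass attributes each distinct hit string to the first track containing it (dict.setdefault), a second pass tallies per track how many distinct strings it introduced, and the result per track is its length minus that tally.
import Mathlib
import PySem

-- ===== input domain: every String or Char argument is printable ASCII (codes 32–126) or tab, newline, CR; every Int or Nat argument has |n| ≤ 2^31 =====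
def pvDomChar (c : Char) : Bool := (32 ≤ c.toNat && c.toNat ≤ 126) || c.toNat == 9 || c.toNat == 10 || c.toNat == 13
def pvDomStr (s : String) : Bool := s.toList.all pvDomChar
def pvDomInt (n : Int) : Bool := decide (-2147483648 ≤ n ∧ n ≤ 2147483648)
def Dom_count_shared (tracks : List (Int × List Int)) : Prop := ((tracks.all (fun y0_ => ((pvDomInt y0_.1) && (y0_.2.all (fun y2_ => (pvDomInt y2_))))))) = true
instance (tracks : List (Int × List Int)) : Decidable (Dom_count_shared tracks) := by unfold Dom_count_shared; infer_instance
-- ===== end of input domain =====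

-- B replaces A's single pass with a running seen-set by a staged pipeline: a first pass attributes
-- each distinct hit string to the first track containing it, a counting pass tallies how many
-- distinct strings each track introduced, and the result is derived per track by subtraction.

-- ===== PORT A =====
def count_shared (tracks : List (Int × List Int)) : List (Int × Int) :=
  (tracks.foldl
    (fun (st : PySem.Set String × PySem.Dict Int Int) p =>
      p.2.foldl
        (fun (st : PySem.Set String × PySem.Dict Int Int) hit =>
          if PySem.Set.contains st.1 (PySem.Int.toStr hit) then
            (st.1, st.2.modify p.1 0 (· + 1))
          else
            (PySem.Set.add st.1 (PySem.Int.toStr hit), st.2))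
        (st.1, st.2.insert p.1 0))
    (PySem.Set.empty, PySem.Dict.empty)).2.items

-- ===== PORT B =====
def count_shared_alt (tracks : List (Int × List Int)) : List (Int × Int) :=
  let first_track := tracks.foldl
    (fun (d : PySem.Dict String Int) p =>
      p.2.foldl (fun d hit => d.setdefault (PySem.Int.toStr hit) p.1) d)
    PySem.Dict.empty
  let fresh := first_track.values.foldl
    (fun (f : PySem.Dict Int Int) i => f.insert i (f.getD i 0 + 1))
    PySem.Dict.empty
  (tracks.foldl
    (fun (out : PySem.Dict Int Int) p =>
      out.insert p.1 ((p.2.length : Int) - fresh.getD p.1 0))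
    PySem.Dict.empty).items

-- ===== PRECONDITION & SPEC =====
-- Pre_ excludes association lists with duplicate keys: such lists cannot arise from the Python
-- dict parameter `tracks` (Python dict keys are unique), so no Python input corresponds to them.
def Pre_count_shared (tracks : List (Int × List Int)) : Prop := (tracks.map Prod.fst).Nodup
instance (tracks : List (Int × List Int)) : Decidable (Pre_count_shared tracks) := by unfold Pre_count_shared; infer_instance
def pvWitness_count_shared : (List (Int × List Int)) := [(1, [2, 3]), (2, [3, 2, 5])]

def Spec_count_shared (tracks : List (Int × List Int)) (out : List (Int × Int)) : Prop := out = count_shared_alt tracks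
instance (tracks : List (Int × List Int)) (out : List (Int × Int)) : Decidable (Spec_count_shared tracks out) := by unfold Spec_count_shared; infer_instance

-- ===== CLAIM (what is proved, stated in full; the proofs are below) =====
def Claim_equal_count_shared : Prop := ∀ (tracks : List (Int × List Int)), Dom_count_shared tracks → Pre_count_shared tracks → Spec_count_shared tracks (count_shared tracks)

-- ===== LEMMAS AND PROOFS =====

-- the common reference value: per track, (key, length − number of newly introduced distinct hit strings)
def golden : List (Int × List Int) → List String → List (Int × Int)
  | [], _ => []
  | p :: rest, u =>
      let nw := PySem.Set.diff (PySem.Set.ofList (p.2.map PySem.Int.toStr)) u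
      (p.1, (p.2.length : Int) - (nw.length : Int)) :: golden rest (u ++ nw)

-- the association list B's first pass builds: blocks of (hit string, first track key)
def blocks : List (Int × List Int) → List String → List (String × Int)
  | [], _ => []
  | p :: rest, u =>
      let nw := PySem.Set.diff (PySem.Set.ofList (p.2.map PySem.Int.toStr)) u
      nw.map (fun x => (x, p.1)) ++ blocks rest (u ++ nw)

theorem diff_nodup (s u : List String) :
    (PySem.Set.diff (PySem.Set.ofList s) u).Nodup :=
  (PySem.Set.nodup_ofList s).filter _

theorem mem_diff_not_mem {s u : List String} {x : String}
    (h : x ∈ PySem.Set.diff (PySem.Set.ofList s) u) : x ∉ u := by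
  intro hm
  have h2 := List.of_mem_filter h
  simp at h2
  exact h2 hm

theorem update_eq_append (t : List String) :
    ∀ u : List String, t.Nodup → (∀ x ∈ t, x ∉ u) → PySem.Set.update u t = u ++ t := by
  induction t with
  | nil => intro u _ _; simp [PySem.Set.update_nil]
  | cons a t ih =>
    intro u hnd hdisj
    rw [PySem.Set.update_cons, PySem.Set.add_of_not_mem (hdisj a (by simp)),
      ih (u ++ [a]) hnd.of_cons]
    · simp
    · intro x hx
      simp only [List.mem_append, List.mem_singleton]
      rintro (h | rfl)
      · exact hdisj x (by simp [hx]) h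
      · exact (List.nodup_cons.mp hnd).1 hx

theorem contains_append_singleton (u : List String) (s a : String) :
    PySem.Set.contains (u ++ [s]) a = (PySem.Set.contains u a || a == s) := by
  simp only [PySem.Set.contains_eq_listContains]
  by_cases h : a = s <;> simp [h]

-- peeling the head string off a diff of an ofList
theorem diff_cons_of_contains {u : List String} {a : String} (l : List String)
    (hc : PySem.Set.contains u a = true) :
    PySem.Set.diff (PySem.Set.ofList (a :: l)) u = PySem.Set.diff (PySem.Set.ofList l) u := by
  show (PySem.Set.ofList (a :: l)).filter _ = (PySem.Set.ofList l).filter _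
  rw [PySem.Set.ofList_cons, List.filter_cons_of_neg (by simp only [hc, Bool.not_true]; decide)]
  unfold PySem.Set.discard
  rw [List.filter_filter]
  apply List.filter_congr
  intro x _
  by_cases hx : x = a
  · subst hx
    have := (PySem.Set.contains_iff u x).mp hc
    simp [this]
  · simp [hx]

theorem diff_cons_of_not_contains {u : List String} {a : String} (l : List String)
    (hc : PySem.Set.contains u a = false) :
    PySem.Set.diff (PySem.Set.ofList (a :: l)) u
      = a :: PySem.Set.diff (PySem.Set.ofList l) (u ++ [a]) := by
  show (PySem.Set.ofList (a :: l)).filter _ = a :: (PySem.Set.ofList l).filter _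
  rw [PySem.Set.ofList_cons, List.filter_cons_of_pos (by simp only [hc, Bool.not_false])]
  congr 1
  unfold PySem.Set.discard
  rw [List.filter_filter]
  apply List.filter_congr
  intro x _
  rw [contains_append_singleton, Bool.not_or]

-- ===== A-side characterisation =====

def modify_insert (d : PySem.Dict Int Int) (i c : Int) :
    (d.insert i c).modify i 0 (· + 1) = d.insert i (c + 1) := by
  unfold PySem.Dict.modify
  simp [pysem]

-- the number of already-seen hits A counts for one track, at string level
def sharedCntS (l : List String) (u : List String) : Int :=
  match l with
  | [] => 0
  | s :: t =>
    if PySem.Set.contains u s then 1 + sharedCntS t u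
    else sharedCntS t (PySem.Set.add u s)

-- A's inner per-hit loop: it updates the used set and adds sharedCntS to the count at key i.
theorem innerA (i : Int) (track : List Int) :
    ∀ (u : List String) (d : PySem.Dict Int Int) (c : Int),
      track.foldl
        (fun (st : PySem.Set String × PySem.Dict Int Int) hit =>
          if PySem.Set.contains st.1 (PySem.Int.toStr hit) then
            (st.1, st.2.modify i 0 (· + 1))
          else
            (PySem.Set.add st.1 (PySem.Int.toStr hit), st.2))
        (u, d.insert i c)
      = (PySem.Set.update u (track.map PySem.Int.toStr),
         d.insert i (c + sharedCntS (track.map PySem.Int.toStr) u)) := by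
  induction track with
  | nil => intro u d c; simp [sharedCntS, PySem.Set.update_nil]
  | cons h t ih =>
    intro u d c
    by_cases hc : PySem.Set.contains u (PySem.Int.toStr h) = true
    · have hmem : PySem.Int.toStr h ∈ u := (PySem.Set.contains_iff u _).mp hc
      simp only [List.foldl_cons, hc, if_pos, modify_insert, ih u d (c + 1), List.map_cons,
        sharedCntS, PySem.Set.update_cons, PySem.Set.add_of_mem hmem]
      simp [add_assoc]
    · simp only [List.foldl_cons, hc, if_neg, Bool.false_eq_true, not_false_iff,
        ih (PySem.Set.add u (PySem.Int.toStr h)) d c, List.map_cons, sharedCntS,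
        PySem.Set.update_cons]

-- sharedCntS is the track length minus the number of newly introduced distinct strings
theorem sharedCntS_eq (l : List String) :
    ∀ u : List String,
      sharedCntS l u
        = (l.length : Int) - ((PySem.Set.diff (PySem.Set.ofList l) u).length : Int) := by
  induction l with
  | nil => intro u; simp [sharedCntS, PySem.Set.ofList_nil, PySem.Set.diff]
  | cons s t ih =>
    intro u
    by_cases hc : PySem.Set.contains u s = true
    · rw [diff_cons_of_contains t hc]
      simp only [sharedCntS, if_pos hc, List.length_cons, ih u]
      push_cast; ring
    · have hc' : PySem.Set.contains u s = false := by
        cases h : PySem.Set.contains u s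
        · rfl
        · exact absurd h hc
      have hnm : s ∉ u := fun hm => hc ((PySem.Set.contains_iff u s).mpr hm)
      rw [diff_cons_of_not_contains t hc',
        show sharedCntS (s :: t) u = sharedCntS t (PySem.Set.add u s) by
          simp only [sharedCntS, hc', Bool.false_eq_true, if_false],
        PySem.Set.add_of_not_mem hnm, ih (u ++ [s])]
      simp only [List.length_cons]
      push_cast; ring

theorem A_items (tracks : List (Int × List Int)) :
    ∀ (u : List String) (d : PySem.Dict Int Int),
      (∀ i ∈ tracks.map Prod.fst, d.contains i = false) →
      (tracks.map Prod.fst).Nodup →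
      (tracks.foldl
        (fun (st : PySem.Set String × PySem.Dict Int Int) p =>
          p.2.foldl
            (fun (st : PySem.Set String × PySem.Dict Int Int) hit =>
              if PySem.Set.contains st.1 (PySem.Int.toStr hit) then
                (st.1, st.2.modify p.1 0 (· + 1))
              else
                (PySem.Set.add st.1 (PySem.Int.toStr hit), st.2))
            (st.1, st.2.insert p.1 0))
        (u, d)).2.items = d.items ++ golden tracks u := by
  induction tracks with
  | nil => intro u d _ _; simp [golden]
  | cons p rest ih =>
    intro u d hfresh hnd
    have hupd : PySem.Set.update u (p.2.map PySem.Int.toStr)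
        = u ++ PySem.Set.diff (PySem.Set.ofList (p.2.map PySem.Int.toStr)) u := by
      have h1 : PySem.Set.update u (p.2.map PySem.Int.toStr)
          = PySem.Set.update u (PySem.Set.diff (PySem.Set.ofList (p.2.map PySem.Int.toStr)) u) := by
        rw [PySem.Set.update_eq_append_filter, PySem.Set.update_eq_append_filter,
          PySem.Set.ofList_eq_self_of_nodup _ (diff_nodup _ _)]
        show _ ++ (PySem.Set.ofList _).filter _ = _ ++ ((PySem.Set.ofList _).filter _).filter _
        rw [List.filter_filter]
        simp
      rw [h1, update_eq_append _ u (diff_nodup _ _) (fun x hx => mem_diff_not_mem hx)]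
    simp only [List.foldl_cons]
    rw [innerA p.1 p.2 u d 0, zero_add, sharedCntS_eq (p.2.map PySem.Int.toStr) u, hupd,
      ih _ _ ?_ (by simpa using hnd.of_cons)]
    · rw [PySem.Dict.items_insert_of_not_contains d _ (hfresh p.1 (by simp))]
      simp [golden]
    · intro i hi
      rw [PySem.Dict.contains_insert]
      have hne : i ≠ p.1 := by
        rintro rfl
        exact (List.nodup_cons.mp (by simpa using hnd)).1 hi
      simp [hne, hfresh i (by simp [hi])]

-- ===== B-side characterisation =====

-- B's inner setdefault loop appends exactly the newly seen strings, tagged with this track's key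
theorem innerB (i : Int) (track : List Int) :
    ∀ d : PySem.Dict String Int,
      track.foldl (fun d hit => d.setdefault (PySem.Int.toStr hit) i) d
        = PySem.Dict.mk (d.items ++
            (PySem.Set.diff (PySem.Set.ofList (track.map PySem.Int.toStr)) d.keys).map
              (fun x => (x, i))) := by
  induction track with
  | nil =>
    intro d
    simp only [List.foldl_nil, List.map_nil, PySem.Set.ofList_nil]
    show d = PySem.Dict.mk (d.items ++ ([] : List (String × Int)))
    simp
  | cons h t ih =>
    intro d
    by_cases hc : d.contains (PySem.Int.toStr h) = true
    · have hc' : PySem.Set.contains d.keys (PySem.Int.toStr h) = true := by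
        have : PySem.Int.toStr h ∈ d.keys := (PySem.Dict.contains_iff_mem_keys d _).mp hc
        exact (PySem.Set.contains_iff _ _).mpr this
      rw [List.foldl_cons, PySem.Dict.setdefault_of_contains d i hc, ih d, List.map_cons,
        diff_cons_of_contains _ hc']
    · have hcf : d.contains (PySem.Int.toStr h) = false := by simpa using hc
      have hc' : PySem.Set.contains d.keys (PySem.Int.toStr h) = false := by
        cases hmem : PySem.Set.contains d.keys (PySem.Int.toStr h)
        · rfl
        · exact absurd ((PySem.Dict.contains_iff_mem_keys d _).mpr
            ((PySem.Set.contains_iff _ _).mp hmem)) (by simp [hcf])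
      rw [List.foldl_cons, PySem.Dict.setdefault_of_not_contains d i hcf,
        ih (d.insert (PySem.Int.toStr h) i), List.map_cons, diff_cons_of_not_contains _ hc',
        PySem.Dict.items_insert_of_not_contains d i hcf,
        PySem.Dict.keys_insert_of_not_contains d i hcf]
      simp

theorem firstFold (tracks : List (Int × List Int)) :
    ∀ d : PySem.Dict String Int,
      tracks.foldl
        (fun (d : PySem.Dict String Int) p =>
          p.2.foldl (fun d hit => d.setdefault (PySem.Int.toStr hit) p.1) d)
        d
      = PySem.Dict.mk (d.items ++ blocks tracks d.keys) := by
  induction tracks with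
  | nil =>
    intro d
    show d = PySem.Dict.mk (d.items ++ blocks [] d.keys)
    simp [blocks]
  | cons p rest ih =>
    intro d
    simp only [List.foldl_cons]
    rw [innerB p.1 p.2 d, ih]
    have hkeys : (PySem.Dict.mk (d.items ++
        (PySem.Set.diff (PySem.Set.ofList (p.2.map PySem.Int.toStr)) d.keys).map
          (fun x => (x, p.1)))).keys
        = d.keys ++ PySem.Set.diff (PySem.Set.ofList (p.2.map PySem.Int.toStr)) d.keys := by
      show (d.items ++ _).map Prod.fst = _
      simp [PySem.Dict.keys, List.map_map, Function.comp_def]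
    rw [hkeys]
    show PySem.Dict.mk _ = PySem.Dict.mk _
    simp [blocks]

-- a key not in tracks never appears among blocks' values
theorem count_blocks_zero (tracks : List (Int × List Int)) :
    ∀ (u : List String) (i : Int), i ∉ tracks.map Prod.fst →
      ((blocks tracks u).map Prod.snd).count i = 0 := by
  induction tracks with
  | nil => intro u i _; simp [blocks]
  | cons p rest ih =>
    intro u i hi
    have hne : p.1 ≠ i := by
      rintro rfl
      exact hi (by simp)
    simp only [blocks, List.map_append, List.count_append, List.map_map, Function.comp_def,
      List.map_const', List.count_replicate]
    rw [if_neg (by simp [hne]), ih _ i (fun h => hi (by simp [h]))]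

theorem B_eq_golden (tracks : List (Int × List Int)) :
    ∀ u : List String, (tracks.map Prod.fst).Nodup →
      tracks.map (fun p =>
        (p.1, (p.2.length : Int) - (((blocks tracks u).map Prod.snd).count p.1 : Int)))
      = golden tracks u := by
  induction tracks with
  | nil => intro u _; simp [golden]
  | cons p rest ih =>
    intro u hnd
    have hnotmem : p.1 ∉ rest.map Prod.fst := (List.nodup_cons.mp (by simpa using hnd)).1
    simp only [List.map_cons, blocks, golden]
    congr 1
    · have : ((((PySem.Set.diff (PySem.Set.ofList (p.2.map PySem.Int.toStr)) u).map
          (fun x => (x, p.1)) ++ blocks rest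
            (u ++ PySem.Set.diff (PySem.Set.ofList (p.2.map PySem.Int.toStr)) u)).map
          Prod.snd).count p.1)
          = (PySem.Set.diff (PySem.Set.ofList (p.2.map PySem.Int.toStr)) u).length := by
        simp only [List.map_append, List.count_append, List.map_map, Function.comp_def,
          List.map_const', List.count_replicate]
        rw [if_pos (by simp), count_blocks_zero rest _ p.1 hnotmem]
        simp
      rw [this]
    · rw [← ih (u ++ PySem.Set.diff (PySem.Set.ofList (p.2.map PySem.Int.toStr)) u)
        (by simpa using hnd.of_cons)]
      apply List.map_congr_left
      intro q hq
      have hqne : p.1 ≠ q.1 := by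
        rintro h
        exact hnotmem (h ▸ List.mem_map_of_mem hq)
      simp only [List.map_append, List.count_append, List.map_map, Function.comp_def,
        List.map_const', List.count_replicate]
      rw [if_neg (by simp [hqne])]
      simp

-- ===== VERDICT (by name: the statement is the Claim_ definition above) =====
theorem count_shared_spec : Claim_equal_count_shared := by
  intro tracks _ hpre
  unfold Spec_count_shared
  simp only [count_shared, count_shared_alt]
  rw [A_items tracks PySem.Set.empty PySem.Dict.empty
    (fun i _ => PySem.Dict.contains_empty i) hpre]
  rw [firstFold tracks PySem.Dict.empty]
  rw [PySem.Dict.foldl_insert_getD_add_one_eq_counter]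
  rw [PySem.Dict.items_foldl_insert_fresh tracks Prod.fst _ PySem.Dict.empty
    (fun p _ => PySem.Dict.contains_empty p.1) hpre]
  show [] ++ golden tracks [] = [] ++ tracks.map _
  simp only [List.nil_append]
  rw [← B_eq_golden tracks [] hpre]
  apply List.map_congr_left
  intro p _
  simp only [PySem.Dict.getD_counter]
  congr 2
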